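-- pv_equiv track=rewrite | github.com/leobruss/Esercizi | Lezione05/lezione5.aggiuntivi.py | find_pairs_with_sum
-- ===== SOURCE A (Python) =====
-- def find_pairs_with_sum(number, target):
--     pairs = set()
--     seen = set()
--
--     for n in number:
--         complement = target - n
--         if complement in seen:
--             pair = (min(n, complement), max(n, complement))
--             pairs.add(pair)
--         seen.add(n)
--
--     return pairs
-- ===== SOURCE B (Python) =====
-- def find_pairs_with_sum(number, target):
--     # Quadratic brute force: scan all earlier elements for a matching sum,
--     # deduplicating with an ordered list instead of hash-set complement lookups.
--     pairs = []
--     prefix = []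
--     for n in number:
--         for m in prefix:
--             if m + n == target:
--                 p = (min(m, n), max(m, n))
--                 if p not in pairs:
--                     pairs.append(p)
--         prefix.append(n)
--     return set(pairs)
-- ===== Notes on version B (the rewrite author's own statement) =====
-- stated objective: alternative
-- what changed: Replaces the hash-set complement lookup with a quadratic brute-force sweep: for each element scan all earlier elements for a matching sum, deduplicating with an ordered list of pairs.
import Mathlib
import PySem

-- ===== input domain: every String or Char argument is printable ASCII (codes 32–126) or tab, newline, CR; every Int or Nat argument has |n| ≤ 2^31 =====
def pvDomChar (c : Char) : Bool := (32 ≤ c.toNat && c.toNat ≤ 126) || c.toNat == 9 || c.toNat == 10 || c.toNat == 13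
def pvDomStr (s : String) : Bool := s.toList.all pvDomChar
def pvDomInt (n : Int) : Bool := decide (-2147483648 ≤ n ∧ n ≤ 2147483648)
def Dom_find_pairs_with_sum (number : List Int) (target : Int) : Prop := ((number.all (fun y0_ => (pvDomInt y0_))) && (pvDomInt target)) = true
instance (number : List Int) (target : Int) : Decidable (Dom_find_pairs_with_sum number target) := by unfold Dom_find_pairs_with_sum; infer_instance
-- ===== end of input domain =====

-- B replaces A's hash-set complement lookup by a quadratic scan of all earlier
-- elements with an ordered deduplicating pair list (objective: alternative).

-- ===== PORT A =====
-- A: one pass keeping a set 'seen'; add (min n c, max n c) when complement c was seen.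
def find_pairs_with_sum (number : List Int) (target : Int) : List (Int × Int) :=
  (number.foldl
    (fun (st : PySem.Set (Int × Int) × PySem.Set Int) n =>
      let complement := target - n
      let pairs := if PySem.Set.contains st.2 complement
        then PySem.Set.add st.1 (min n complement, max n complement)
        else st.1
      (pairs, PySem.Set.add st.2 n))
    (PySem.Set.empty, PySem.Set.empty)).1

-- ===== PORT B =====
-- B: for each n scan the list of earlier elements; append new matching pairs to a list.
def find_pairs_with_sum_alt (number : List Int) (target : Int) : List (Int × Int) :=
  let st := number.foldl
    (fun (st : List (Int × Int) × List Int) n =>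
      let pairs := st.2.foldl
        (fun pairs m =>
          if m + n == target then
            let p := (min m n, max m n)
            if pairs.contains p then pairs else pairs ++ [p]
          else pairs)
        st.1
      (pairs, st.2 ++ [n]))
    ([], [])
  PySem.Set.ofList st.1

-- ===== PRECONDITION & SPEC =====
def Spec_find_pairs_with_sum (number : List Int) (target : Int) (out : List (Int × Int)) : Prop := out = find_pairs_with_sum_alt number target
instance (number : List Int) (target : Int) (out : List (Int × Int)) : Decidable (Spec_find_pairs_with_sum number target out) := by unfold Spec_find_pairs_with_sum; infer_instance

-- ===== CLAIM (what is proved, stated in full; the proofs are below) =====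
def Claim_equal_find_pairs_with_sum : Prop := ∀ (number : List Int) (target : Int), Dom_find_pairs_with_sum number target → Spec_find_pairs_with_sum number target (find_pairs_with_sum number target)

-- ===== LEMMAS AND PROOFS =====

-- B's inner loop over the earlier elements equals A's conditional set insertion.
theorem pv_inner (n target : Int) :
    ∀ (pre : List Int) (pairs : List (Int × Int)),
    pre.foldl
      (fun pairs m =>
        if m + n == target then
          let p := (min m n, max m n)
          if pairs.contains p then pairs else pairs ++ [p]
        else pairs) pairs
    = if (target - n) ∈ pre
        then PySem.Set.add pairs (min n (target - n), max n (target - n))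
        else pairs := by
  intro pre
  induction pre with
  | nil => intro pairs; simp
  | cons m pre ih =>
    intro pairs
    by_cases hm : m + n = target
    · have hmc : m = target - n := by omega
      subst hmc
      simp only [List.foldl_cons, ih, List.mem_cons]
      have hmin : min (target - n) n = min n (target - n) := min_comm _ _
      have hmax : max (target - n) n = max n (target - n) := max_comm _ _
      rw [if_pos (show (target - n + n == target) = true by simp)]
      simp only [hmin, hmax]
      have hstep : (if pairs.contains (min n (target - n), max n (target - n)) = true
            then pairs else pairs ++ [(min n (target - n), max n (target - n))])
          = PySem.Set.add pairs (min n (target - n), max n (target - n)) := rfl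
      rw [hstep]
      simp
    · have hne : m ≠ target - n := by omega
      simp only [List.foldl_cons, List.mem_cons]
      rw [if_neg (by simpa using hm), ih]
      simp [Ne.symm hne]

-- main invariant: A with seen = set(pre) matches B with prefix list pre.
theorem pv_main (target : Int) :
    ∀ (number : List Int) (pairs : PySem.Set (Int × Int)) (pre : List Int),
    (number.foldl
      (fun (st : PySem.Set (Int × Int) × PySem.Set Int) n =>
        let complement := target - n
        let pairs := if PySem.Set.contains st.2 complement
          then PySem.Set.add st.1 (min n complement, max n complement)
          else st.1
        (pairs, PySem.Set.add st.2 n))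
      (pairs, PySem.Set.ofList pre)).1
    = (number.foldl
      (fun (st : List (Int × Int) × List Int) n =>
        let pairs := st.2.foldl
          (fun pairs m =>
            if m + n == target then
              let p := (min m n, max m n)
              if pairs.contains p then pairs else pairs ++ [p]
            else pairs)
          st.1
        (pairs, st.2 ++ [n]))
      (pairs, pre)).1 := by
  intro number
  induction number with
  | nil => intro pairs pre; rfl
  | cons n number ih =>
    intro pairs pre
    simp only [List.foldl_cons]
    have hseen : PySem.Set.add (PySem.Set.ofList pre) n = PySem.Set.ofList (pre ++ [n]) := by
      simp [PySem.Set.ofList_eq_foldl, List.foldl_append]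
    have hmem : PySem.Set.contains (PySem.Set.ofList pre) (target - n)
        = decide ((target - n) ∈ pre) := by
      by_cases h : (target - n) ∈ pre
      · exact (PySem.Set.contains_iff _ _).2 ((PySem.Set.mem_ofList _ _).2 h) |>.trans (by simp [h])
      · simp only [h, decide_false]
        by_cases hc : PySem.Set.contains (PySem.Set.ofList pre) (target - n) = true
        · exact absurd ((PySem.Set.mem_ofList _ _).1 ((PySem.Set.contains_iff _ _).1 hc)) h
        · simpa using hc
    rw [pv_inner, hseen] at *
    by_cases h : (target - n) ∈ pre
    · simp only [hmem, h, decide_true, if_pos]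
      exact ih _ _
    · simp only [hmem, h, decide_false, if_false, Bool.false_eq_true]
      simpa using ih pairs (pre ++ [n])

-- B's pair list is duplicate-free, so set(pairs) is pairs itself.
theorem pv_nodup (target : Int) :
    ∀ (number : List Int) (pairs : List (Int × Int)) (pre : List Int), pairs.Nodup →
    (number.foldl
      (fun (st : List (Int × Int) × List Int) n =>
        let pairs := st.2.foldl
          (fun pairs m =>
            if m + n == target then
              let p := (min m n, max m n)
              if pairs.contains p then pairs else pairs ++ [p]
            else pairs)
          st.1
        (pairs, st.2 ++ [n]))
      (pairs, pre)).1.Nodup := by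
  intro number
  induction number with
  | nil => intro pairs pre h; exact h
  | cons n number ih =>
    intro pairs pre h
    simp only [List.foldl_cons]
    rw [pv_inner]
    split
    · exact ih _ _ (PySem.Set.nodup_add _ _ h)
    · exact ih _ _ h

-- ===== VERDICT (by name: the statement is the Claim_ definition above) =====
theorem find_pairs_with_sum_spec : Claim_equal_find_pairs_with_sum := by
  intro number target _
  unfold Spec_find_pairs_with_sum find_pairs_with_sum find_pairs_with_sum_alt
  have h := pv_main target number [] []
  simp only [PySem.Set.ofList] at h
  rw [show (PySem.Set.empty : PySem.Set (Int × Int)) = [] from rfl,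
      show (PySem.Set.empty : PySem.Set Int) = PySem.Set.ofList [] from rfl, pv_main]
  exact (PySem.Set.ofList_eq_self_of_nodup _ (pv_nodup target number [] [] List.nodup_nil)).symm
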